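-- pv_equiv track=rewrite | github.com/TungMunte/LFA_tema2 | src/AST.py | parenthesisBehindUnion
-- ===== SOURCE A (Python) =====
-- def parenthesisBehindUnion(stack: list):
--     positionUnion = len(stack) - 1
--     positionParenthesis = len(stack) - 1
--     found = False
--     while found is False and positionParenthesis >= 0:
--         if stack[positionParenthesis] == ")":
--             found = True
--         positionParenthesis = positionParenthesis - 1
--     found = False
--     while found is False and positionUnion >= 0:
--         if stack[positionUnion] == "|":
--             found = True
--         positionUnion = positionUnion - 1
--     if positionUnion > positionParenthesis:
--         return True
--     return False
-- ===== SOURCE B (Python) =====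
-- def parenthesisBehindUnion(stack: list):
--     lastUnion = 0
--     lastParen = 0
--     for idx, elem in enumerate(stack):
--         if elem == "|":
--             lastUnion = idx
--         if elem == ")":
--             lastParen = idx
--     return lastUnion > lastParen
-- ===== Notes on version B (the rewrite author's own statement) =====
-- stated objective: simpler
-- what changed: Replaced A's two separate backward while-loop scans (with post-decrement index bookkeeping) by one forward enumerate pass maintaining the last seen positions of '|' and ')'.
import Mathlib
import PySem

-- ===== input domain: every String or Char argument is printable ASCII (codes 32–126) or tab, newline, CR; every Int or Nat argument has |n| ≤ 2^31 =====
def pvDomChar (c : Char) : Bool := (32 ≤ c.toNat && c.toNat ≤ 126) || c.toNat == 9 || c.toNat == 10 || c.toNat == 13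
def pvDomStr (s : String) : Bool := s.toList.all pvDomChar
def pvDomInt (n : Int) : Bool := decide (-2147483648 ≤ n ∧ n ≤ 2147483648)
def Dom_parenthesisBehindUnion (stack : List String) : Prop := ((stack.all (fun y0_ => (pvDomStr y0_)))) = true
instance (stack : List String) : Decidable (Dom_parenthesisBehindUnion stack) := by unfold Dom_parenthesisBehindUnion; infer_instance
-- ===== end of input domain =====

-- B replaces A's two backward while-loop scans by one forward pass tracking last positions; objective: simpler.

-- ===== PORT A =====
-- the backward 'while found is False and position >= 0' scan; the Nat argument is position+1
-- (0 encodes position = -1); when the target is found at p the loop decrements once more and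
-- exits, returning p - 1, exactly as A does.
def aScan (stack : List String) (target : String) : Nat → Int
  | 0 => -1
  | p + 1 =>
    if (PySem.List.pyGet? stack (p : Int)).getD "" == target then (p : Int) - 1
    else aScan stack target p

def parenthesisBehindUnion (stack : List String) : Bool :=
  let positionParenthesis := aScan stack ")" stack.length
  let positionUnion := aScan stack "|" stack.length
  if positionUnion > positionParenthesis then true else false

-- ===== PORT B =====
-- single forward pass: (idx, lastUnion, lastParen) state over the list
def bLoop : List String → Nat → Nat → Nat → Nat × Nat
  | [], _, lu, lp => (lu, lp)
  | s :: rest, i, lu, lp =>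
      bLoop rest (i + 1) (if s == "|" then i else lu) (if s == ")" then i else lp)

def parenthesisBehindUnion_alt (stack : List String) : Bool :=
  let (lastUnion, lastParen) := bLoop stack 0 0 0
  decide (lastUnion > lastParen)

-- ===== PRECONDITION & SPEC =====
def Spec_parenthesisBehindUnion (stack : List String) (out : Bool) : Prop := out = parenthesisBehindUnion_alt stack
instance (stack : List String) (out : Bool) : Decidable (Spec_parenthesisBehindUnion stack out) := by unfold Spec_parenthesisBehindUnion; infer_instance

-- ===== CLAIM (what is proved, stated in full; the proofs are below) =====
def Claim_equal_parenthesisBehindUnion : Prop := ∀ (stack : List String), Dom_parenthesisBehindUnion stack → Spec_parenthesisBehindUnion stack (parenthesisBehindUnion stack)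

-- ===== LEMMAS AND PROOFS =====

-- last index of target in stack, or none
def lastIdx? : List String → String → Option Nat
  | [], _ => none
  | s :: rest, t =>
    match lastIdx? rest t with
    | some i => some (i + 1)
    | none => if s == t then some 0 else none

-- one component of bLoop's state, in isolation
def fwdLast : List String → String → Nat → Nat → Nat
  | [], _, _, lu => lu
  | s :: rest, t, i, lu => fwdLast rest t (i + 1) (if s == t then i else lu)

theorem bLoop_eq_fwdLast (stack : List String) (i lu lp : Nat) :
    bLoop stack i lu lp = (fwdLast stack "|" i lu, fwdLast stack ")" i lp) := by
  induction stack generalizing i lu lp with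
  | nil => rfl
  | cons s rest ih => simp [bLoop, fwdLast, ih]

theorem fwdLast_eq_lastIdx (stack : List String) (t : String) (i lu : Nat) :
    fwdLast stack t i lu = match lastIdx? stack t with
      | some j => i + j
      | none => lu := by
  induction stack generalizing i lu with
  | nil => rfl
  | cons s rest ih =>
    show fwdLast rest t (i + 1) (if s == t then i else lu) = _
    rw [ih]
    by_cases hs : s == t <;> cases h : lastIdx? rest t <;>
        simp [lastIdx?, h, hs]
    all_goals ring

theorem aScan_eq_lastIdx (stack : List String) (t : String) (n : Nat) (hn : n ≤ stack.length) :
    aScan stack t n = match lastIdx? (stack.take n) t with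
      | some j => (j : Int) - 1
      | none => -1 := by
  induction n with
  | zero => simp [aScan, lastIdx?]
  | succ p ih =>
    have hp : p < stack.length := by omega
    have hget : (PySem.List.pyGet? stack (p : Int)).getD "" = stack[p] := by
      simp [PySem.List.pyGet?, PySem.List.pyIdx?, hp]
    -- take (p+1) = take p ++ [stack[p]]
    have htake : stack.take (p + 1) = stack.take p ++ [stack[p]] := by
      rw [List.take_add_one, List.getElem?_eq_getElem hp]; rfl
    rw [htake]
    have hlast : ∀ xs s, lastIdx? (xs ++ [s]) t =
        if s == t then some xs.length else lastIdx? xs t := by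
      intro xs s
      induction xs with
      | nil => by_cases hs : s == t <;> simp [lastIdx?, hs]
      | cons x xs ihx =>
        by_cases hs : s == t <;> by_cases hx : x == t <;>
          simp [lastIdx?, ihx, hs, hx]
    rw [hlast]
    have hlen : (stack.take p).length = p := by simp; omega
    simp only [aScan, hget]
    by_cases hs : stack[p] == t
    · simp [hs, hlen]
    · simp [hs, ih (by omega)]

theorem main_eq (stack : List String) :
    parenthesisBehindUnion stack = parenthesisBehindUnion_alt stack := by
  have hA := fun t => aScan_eq_lastIdx stack t stack.length (le_refl _)
  have hB := bLoop_eq_fwdLast stack 0 0 0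
  simp only [List.take_length] at hA
  unfold parenthesisBehindUnion parenthesisBehindUnion_alt
  rw [hA, hA, hB]
  simp only [fwdLast_eq_lastIdx]
  cases hu : lastIdx? stack "|" <;> cases hp : lastIdx? stack ")" <;>
    simp <;> omega

-- ===== VERDICT (by name: the statement is the Claim_ definition above) =====
theorem parenthesisBehindUnion_spec : Claim_equal_parenthesisBehindUnion := by
  intro stack _
  unfold Spec_parenthesisBehindUnion
  exact main_eq stack
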